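-- pv_equiv track=rewrite | github.com/outheis-labs/outheis-beta | tools/test_pattern_agent.py | check_extract_basic
-- ===== SOURCE A (Python) =====
-- def verdict(sym: str, detail: str = "") -> tuple[str, str]:
--     return sym, detail
--
-- def check_extract_basic(data: dict) -> tuple[str, str]:
--     exts = data.get("extractions", [])
--     if not exts:
--         return verdict("✗", "no extractions")
--     types = {e.get("type") for e in exts}
--     has_user = "user" in types
--     has_feedback = "feedback" in types
--     has_context = "context" in types
--     contents = " ".join(e.get("content", "").lower() for e in exts)
--     has_name = "alice" in contents
--     has_pref = any(w in contents for w in ["short", "concise", "brief", "direct"])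
--     has_deadline = any(w in contents for w in ["deadline", "friday", "release"])
--     hits = sum([has_user and has_name, has_feedback and has_pref, has_context and has_deadline])
--     if hits == 3:
--         return verdict("✓", f"{len(exts)} extractions, all 3 types correct")
--     if hits >= 2:
--         return verdict("~", f"{len(exts)} extractions, {hits}/3 correct")
--     return verdict("✗", f"only {hits}/3 correctly classified")
-- ===== SOURCE B (Python) =====
-- def check_extract_basic(data: dict) -> tuple[str, str]:
--     exts = data.get("extractions", [])
--     if not exts:
--         return "✗", "no extractions"
--     has_user = has_feedback = has_context = False
--     has_name = has_pref = has_deadline = False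
--     for e in exts:
--         t = e.get("type")
--         has_user = has_user or t == "user"
--         has_feedback = has_feedback or t == "feedback"
--         has_context = has_context or t == "context"
--         c = e.get("content", "").lower()
--         has_name = has_name or "alice" in c
--         has_pref = has_pref or any(w in c for w in ["short", "concise", "brief", "direct"])
--         has_deadline = has_deadline or any(w in c for w in ["deadline", "friday", "release"])
--     hits = sum([has_user and has_name, has_feedback and has_pref, has_context and has_deadline])
--     if hits == 3:
--         return "✓", f"{len(exts)} extractions, all 3 types correct"
--     if hits >= 2:
--         return "~", f"{len(exts)} extractions, {hits}/3 correct"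
--     return "✗", f"only {hits}/3 correctly classified"
-- ===== Notes on version B (the rewrite author's own statement) =====
-- stated objective: alternative
-- what changed: Replaces A's precomputed type-set and the joined-and-searched contents string with a single pass over the extractions that maintains six boolean flags, checking each extraction's type and lowered content directly (valid since no search word contains a space, so no match can cross the join boundary).
import Mathlib
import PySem

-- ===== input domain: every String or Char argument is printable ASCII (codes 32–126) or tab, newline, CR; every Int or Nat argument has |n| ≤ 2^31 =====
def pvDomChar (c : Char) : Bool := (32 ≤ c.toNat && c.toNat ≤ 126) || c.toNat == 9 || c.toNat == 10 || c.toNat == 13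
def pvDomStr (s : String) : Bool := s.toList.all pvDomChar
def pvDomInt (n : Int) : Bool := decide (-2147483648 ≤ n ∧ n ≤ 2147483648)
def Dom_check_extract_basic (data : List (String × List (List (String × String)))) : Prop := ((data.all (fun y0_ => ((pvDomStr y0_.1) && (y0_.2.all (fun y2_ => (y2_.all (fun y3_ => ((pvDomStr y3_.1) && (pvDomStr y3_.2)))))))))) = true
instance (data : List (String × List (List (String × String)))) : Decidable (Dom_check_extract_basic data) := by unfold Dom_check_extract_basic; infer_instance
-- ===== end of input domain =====

-- B replaces A's precomputed type-set and joined-contents string by one loop over the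
-- extractions maintaining six boolean flags (objective: alternative decomposition, same cost).

-- ===== PORT A =====
def verdict (sym : String) (detail : String) : String × String := (sym, detail)

def check_extract_basic (data : List (String × List (List (String × String)))) : String × String :=
  let exts := PySem.Dict.getD (PySem.Dict.mk data) "extractions" []
  if exts = [] then verdict "✗" "no extractions"
  else
    let types := PySem.Set.ofList (exts.map (fun e => PySem.Dict.get? (PySem.Dict.mk e) "type"))
    let has_user := types.contains (some "user")
    let has_feedback := types.contains (some "feedback")
    let has_context := types.contains (some "context")
    let contents := PySem.Str.join " "
      (exts.map (fun e => PySem.Str.lower (PySem.Dict.getD (PySem.Dict.mk e) "content" "")))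
    let has_name := PySem.Str.isIn "alice" contents
    let has_pref := (["short", "concise", "brief", "direct"].any (fun w => PySem.Str.isIn w contents))
    let has_deadline := (["deadline", "friday", "release"].any (fun w => PySem.Str.isIn w contents))
    let hits : Int := (if has_user && has_name then 1 else 0)
      + (if has_feedback && has_pref then 1 else 0)
      + (if has_context && has_deadline then 1 else 0)
    if hits = 3 then
      verdict "✓" (PySem.Int.toStr exts.length ++ " extractions, all 3 types correct")
    else if 2 ≤ hits then
      verdict "~" (PySem.Int.toStr exts.length ++ " extractions, " ++ PySem.Int.toStr hits ++ "/3 correct")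
    else
      verdict "✗" ("only " ++ PySem.Int.toStr hits ++ "/3 correctly classified")

-- ===== PORT B =====
-- the loop body of B's for-loop (state = the six boolean flags, in order)
def pvStepB (s : Bool × Bool × Bool × Bool × Bool × Bool) (e : List (String × String)) :
    Bool × Bool × Bool × Bool × Bool × Bool :=
  let t := PySem.Dict.get? (PySem.Dict.mk e) "type"
  let c := PySem.Str.lower (PySem.Dict.getD (PySem.Dict.mk e) "content" "")
  (s.1 || (t == some "user"),
   s.2.1 || (t == some "feedback"),
   s.2.2.1 || (t == some "context"),
   s.2.2.2.1 || PySem.Str.isIn "alice" c,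
   s.2.2.2.2.1 || (["short", "concise", "brief", "direct"].any (fun w => PySem.Str.isIn w c)),
   s.2.2.2.2.2 || (["deadline", "friday", "release"].any (fun w => PySem.Str.isIn w c)))

def check_extract_basic_alt (data : List (String × List (List (String × String)))) : String × String :=
  let exts := PySem.Dict.getD (PySem.Dict.mk data) "extractions" []
  if exts = [] then ("✗", "no extractions")
  else
    let fl := exts.foldl pvStepB (false, false, false, false, false, false)
    let hits : Int := (if fl.1 && fl.2.2.2.1 then 1 else 0)
      + (if fl.2.1 && fl.2.2.2.2.1 then 1 else 0)
      + (if fl.2.2.1 && fl.2.2.2.2.2 then 1 else 0)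
    if hits = 3 then
      ("✓", PySem.Int.toStr exts.length ++ " extractions, all 3 types correct")
    else if 2 ≤ hits then
      ("~", PySem.Int.toStr exts.length ++ " extractions, " ++ PySem.Int.toStr hits ++ "/3 correct")
    else
      ("✗", "only " ++ PySem.Int.toStr hits ++ "/3 correctly classified")

-- ===== PRECONDITION & SPEC =====
def Spec_check_extract_basic (data : List (String × List (List (String × String)))) (out : String × String) : Prop := out = check_extract_basic_alt data
instance (data : List (String × List (List (String × String)))) (out : String × String) : Decidable (Spec_check_extract_basic data out) := by unfold Spec_check_extract_basic; infer_instance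

-- ===== CLAIM (what is proved, stated in full; the proofs are below) =====
def Claim_equal_check_extract_basic : Prop := ∀ (data : List (String × List (List (String × String)))), Dom_check_extract_basic data → Spec_check_extract_basic data (check_extract_basic data)

-- ===== LEMMAS AND PROOFS =====

-- a prefix of a ++ ' ' :: b that contains no space is a prefix of a
lemma pv_prefix_no_space {w a b : List Char} (hw : ' ' ∉ w) (h : w <+: a ++ ' ' :: b) :
    w <+: a := by
  rcases Nat.lt_or_ge a.length w.length with hl | hl
  swap
  · exact List.prefix_of_prefix_length_le h (List.prefix_append a (' ' :: b)) hl
  · exfalso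
    have ha : a <+: w :=
      List.prefix_of_prefix_length_le (List.prefix_append a (' ' :: b)) h (by omega)
    rcases ha with ⟨r, hr⟩
    rcases h with ⟨t, ht⟩
    subst hr
    rw [List.append_assoc] at ht
    have hrt : r ++ t = ' ' :: b := List.append_cancel_left ht
    cases r with
    | nil => simp at hl
    | cons x r' =>
      have hx : x = ' ' := by simpa using congrArg List.head? hrt
      exact hw (List.mem_append_right a (hx ▸ List.mem_cons_self))

-- a space-free word is an infix of a ++ ' ' :: b iff it is an infix of a or of b
lemma pv_infix_split {w : List Char} (hw : ' ' ∉ w) (a b : List Char) :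
    w <:+: a ++ ' ' :: b ↔ w <:+: a ∨ w <:+: b := by
  induction a with
  | nil =>
    simp only [List.nil_append, List.infix_cons_iff]
    constructor
    · rintro (hp | hi)
      · cases w with
        | nil => exact Or.inl List.nil_infix
        | cons x w' =>
          exfalso
          rcases hp with ⟨t, ht⟩
          have hx : x = ' ' := by simpa using congrArg List.head? ht
          exact hw (hx ▸ List.mem_cons_self)
      · exact Or.inr hi
    · rintro (h | h)
      · rw [List.infix_nil] at h
        subst h
        exact Or.inr List.nil_infix
      · exact Or.inr h
  | cons x a' ih =>
    rw [List.cons_append, List.infix_cons_iff]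
    constructor
    · rintro (hp | hi)
      · rw [← List.cons_append] at hp
        exact Or.inl (pv_prefix_no_space hw hp).isInfix
      · rcases ih.mp hi with h | h
        · exact Or.inl (h.trans (List.infix_cons (List.infix_refl a')))
        · exact Or.inr h
    · rintro (h | h)
      · rcases List.infix_cons_iff.mp h with hp | hi
        · exact Or.inl (hp.trans (by rw [← List.cons_append]; exact List.prefix_append _ _))
        · exact Or.inr (ih.mpr (Or.inl hi))
      · exact Or.inr (ih.mpr (Or.inr h))

-- a space-free word occurs in ' '.join(ls) iff it occurs in one of the pieces (ls nonempty)
lemma pv_isIn_join {w : List Char} (hw : ' ' ∉ w) :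
    ∀ ls : List (List Char), ls ≠ [] →
      PySem.Chars.isIn w (PySem.Chars.join [' '] ls) = ls.any (fun c => PySem.Chars.isIn w c)
  | [], h => absurd rfl h
  | [c], _ => by simp [PySem.Chars.join_singleton]
  | c :: c2 :: rest, _ => by
    rw [PySem.Chars.join_cons_cons]
    apply Bool.coe_iff_coe.mp
    rw [PySem.Chars.isIn_iff_infix]
    have hform : c ++ [' '] ++ PySem.Chars.join [' '] (c2 :: rest)
        = c ++ ' ' :: PySem.Chars.join [' '] (c2 :: rest) := by simp
    rw [hform, pv_infix_split hw]
    have ihr := pv_isIn_join hw (c2 :: rest) (by simp)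
    simp [← PySem.Chars.isIn_iff_infix, ihr]

-- Str-level form, for one word against the joined lowered contents
lemma pv_isIn_join_str (w : String) (hw : ' ' ∉ w.toList) (exts : List (List (String × String)))
    (hne : exts ≠ []) :
    PySem.Str.isIn w (PySem.Str.join " " (exts.map (fun e => PySem.Str.lower (PySem.Dict.getD (PySem.Dict.mk e) "content" ""))))
      = exts.any (fun e => PySem.Str.isIn w (PySem.Str.lower (PySem.Dict.getD (PySem.Dict.mk e) "content" ""))) := by
  rw [PySem.Str.isIn_eq, PySem.Str.toList_join]
  have hls : (exts.map (fun e => PySem.Str.lower (PySem.Dict.getD (PySem.Dict.mk e) "content" ""))).map String.toList ≠ [] := by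
    simp [hne]
  have hsp : (" " : String).toList = [' '] := by decide
  rw [hsp, pv_isIn_join hw _ hls]
  simp only [List.any_map]
  rfl

-- a list of space-free words: any occurs in the joined contents iff some extraction has one
lemma pv_any_words (ws : List String) (hws : ∀ w ∈ ws, ' ' ∉ w.toList)
    (exts : List (List (String × String))) (hne : exts ≠ []) :
    ws.any (fun w => PySem.Str.isIn w (PySem.Str.join " " (exts.map (fun e => PySem.Str.lower (PySem.Dict.getD (PySem.Dict.mk e) "content" "")))))
      = exts.any (fun e => ws.any (fun w => PySem.Str.isIn w (PySem.Str.lower (PySem.Dict.getD (PySem.Dict.mk e) "content" "")))) := by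
  apply Bool.coe_iff_coe.mp
  simp only [List.any_eq_true]
  constructor
  · rintro ⟨w, hwmem, h⟩
    rw [pv_isIn_join_str w (hws w hwmem) exts hne, List.any_eq_true] at h
    rcases h with ⟨e, he, h⟩
    exact ⟨e, he, w, hwmem, h⟩
  · rintro ⟨e, he, w, hwmem, h⟩
    refine ⟨w, hwmem, ?_⟩
    rw [pv_isIn_join_str w (hws w hwmem) exts hne, List.any_eq_true]
    exact ⟨e, he, h⟩

-- set-of-mapped-values membership = any over the list
lemma pv_contains_ofList_map {α β : Type} [BEq β] [LawfulBEq β] (l : List α) (f : α → β) (x : β) :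
    (PySem.Set.ofList (l.map f)).contains x = l.any (fun e => f e == x) := by
  apply Bool.coe_iff_coe.mp
  rw [PySem.Set.contains_iff]
  simp [PySem.Set.mem_ofList, List.any_eq_true, beq_iff_eq]

-- the fold over the six flags computes an `any` per flag
lemma pv_foldB (exts : List (List (String × String))) :
    ∀ s : Bool × Bool × Bool × Bool × Bool × Bool,
      exts.foldl pvStepB s =
        (s.1 || exts.any (fun e => PySem.Dict.get? (PySem.Dict.mk e) "type" == some "user"),
         s.2.1 || exts.any (fun e => PySem.Dict.get? (PySem.Dict.mk e) "type" == some "feedback"),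
         s.2.2.1 || exts.any (fun e => PySem.Dict.get? (PySem.Dict.mk e) "type" == some "context"),
         s.2.2.2.1 || exts.any (fun e => PySem.Str.isIn "alice" (PySem.Str.lower (PySem.Dict.getD (PySem.Dict.mk e) "content" ""))),
         s.2.2.2.2.1 || exts.any (fun e => (["short", "concise", "brief", "direct"].any (fun w => PySem.Str.isIn w (PySem.Str.lower (PySem.Dict.getD (PySem.Dict.mk e) "content" ""))))),
         s.2.2.2.2.2 || exts.any (fun e => (["deadline", "friday", "release"].any (fun w => PySem.Str.isIn w (PySem.Str.lower (PySem.Dict.getD (PySem.Dict.mk e) "content" "")))))) := by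
  induction exts with
  | nil => intro s; simp
  | cons e t ih =>
    intro s
    rw [List.foldl_cons, ih]
    simp [pvStepB, Bool.or_assoc]

-- ===== VERDICT (by name: the statement is the Claim_ definition above) =====
theorem check_extract_basic_spec : Claim_equal_check_extract_basic := by
  intro data _
  unfold Spec_check_extract_basic
  show check_extract_basic data = check_extract_basic_alt data
  unfold check_extract_basic check_extract_basic_alt
  by_cases h : PySem.Dict.getD (PySem.Dict.mk data) "extractions" [] = []
  · rw [if_pos h, if_pos h]
    rfl
  · simp only [if_neg h]
    rw [pv_foldB _ (false, false, false, false, false, false)]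
    rw [pv_contains_ofList_map, pv_contains_ofList_map, pv_contains_ofList_map]
    have hn := pv_isIn_join_str "alice" (by decide) _ h
    rw [hn]
    rw [pv_any_words ["short", "concise", "brief", "direct"] (by decide) _ h]
    rw [pv_any_words ["deadline", "friday", "release"] (by decide) _ h]
    rfl
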